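-- pv_equiv track=rewrite | github.com/jurajstrecha/AdventOfCode2018 | day02/CommonLetters.py | get_single_mismatch_index
-- ===== SOURCE A (Python) =====
-- def get_single_mismatch_index(id1, id2):
-- 	mismatch_count = 0
-- 	mismatch_index = -1
--
-- 	for j in range(0, len(id1)):
-- 		if id1[j] != id2[j]:
-- 			mismatch_count = mismatch_count + 1
-- 			if mismatch_count == 1:
-- 				mismatch_index = j
-- 			elif mismatch_count > 1:
-- 				return -1
--
-- 	return mismatch_index
-- ===== SOURCE B (Python) =====
-- def common_prefix_len(x, y):
--     k = 0
--     for a, b in zip(x, y):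
--         if a != b:
--             break
--         k += 1
--     return k
--
-- def get_single_mismatch_index(id1, id2):
--     n = len(id1)
--     t = id2[:n]
--     p = common_prefix_len(id1, t)          # length of matching prefix
--     if p == n:
--         return -1                          # no mismatch at all
--     s = common_prefix_len(id1[::-1], t[::-1])  # length of matching suffix
--     return p if p + s == n - 1 else -1     # exactly one mismatch iff prefix+suffix cover all but one position
-- ===== Notes on version B (the rewrite author's own statement) =====
-- stated objective: alternative
-- what changed: B matches the strings from both ends instead of counting mismatches: it computes the longest common prefix and the longest common suffix of id1 and id2[:len(id1)] and decides arithmetically (exactly one mismatch iff prefix+suffix = n-1, and then its index is the prefix length), replacing A's running counter, mutable best-index and mid-loop early return.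
-- outside the precondition, e.g. on get_single_mismatch_index('baab', 'aab'): A returns -1, B returns 0
import Mathlib
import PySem

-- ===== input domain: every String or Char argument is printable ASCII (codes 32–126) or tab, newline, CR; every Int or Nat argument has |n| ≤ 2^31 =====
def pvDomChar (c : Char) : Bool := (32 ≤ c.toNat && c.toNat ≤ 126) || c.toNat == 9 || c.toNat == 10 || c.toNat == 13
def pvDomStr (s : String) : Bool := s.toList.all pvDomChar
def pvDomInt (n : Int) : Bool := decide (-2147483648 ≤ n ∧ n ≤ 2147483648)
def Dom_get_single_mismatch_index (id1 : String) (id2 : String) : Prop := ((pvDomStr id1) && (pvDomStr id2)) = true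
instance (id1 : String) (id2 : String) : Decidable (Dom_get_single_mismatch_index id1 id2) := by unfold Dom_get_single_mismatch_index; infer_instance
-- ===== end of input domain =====

-- B replaces A's counting loop by a prefix/suffix decomposition: match the two strings
-- from both ends (longest common prefix and longest common suffix of id1 and id2[:len(id1)])
-- and decide arithmetically — exactly one mismatch iff prefix + suffix = n - 1 (objective: alternative).


-- ===== PORT A =====
-- A's for-loop, state (mismatch_count, mismatch_index); the `elif mismatch_count > 1`
-- branch is the early `return -1`
def pvALoop (l1 l2 : List Char) : List Int → Int → Int → Int
  | [], _, idx => idx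
  | j :: rest, count, idx =>
    if PySem.List.pyGet? l1 j ≠ PySem.List.pyGet? l2 j then
      if count + 1 = 1 then pvALoop l1 l2 rest (count + 1) j
      else if count + 1 > 1 then -1
      else pvALoop l1 l2 rest (count + 1) idx
    else pvALoop l1 l2 rest count idx

def get_single_mismatch_index (id1 : String) (id2 : String) : Int :=
  pvALoop id1.toList id2.toList
    (PySem.List.pyRange 0 (id1.toList.length : Int) 1) 0 (-1)

-- ===== PORT B =====
-- common_prefix_len(x, y): zip-style simultaneous walk, stops at the first unequal pair
-- (or when either list ends, like Python's zip)
def pvPrefLen : List Char → List Char → Nat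
  | a :: as, b :: bs => if a ≠ b then 0 else pvPrefLen as bs + 1
  | _, _ => 0

-- id2[:n] is PySem.List.slice; id1[::-1] (reversal) is ported as List.reverse
-- (exact: PySem.List.slice?_none_none_neg_one)
def get_single_mismatch_index_alt (id1 : String) (id2 : String) : Int :=
  let l1 := id1.toList
  let n := l1.length
  let t := PySem.List.slice id2.toList none (some (n : Int))
  let p := pvPrefLen l1 t
  if p = n then -1
  else
    let s := pvPrefLen l1.reverse t.reverse
    if (p : Int) + (s : Int) = (n : Int) - 1 then (p : Int) else -1

-- ===== PRECONDITION & SPEC =====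
-- Pre_ excludes inputs with len(id1) > len(id2): there A raises IndexError except when it
-- meets a second mismatch before running off id2 and early-returns -1 (an artefact of the
-- early return that B, which compares against the truncated id2[:len(id1)], does not share).
def Pre_get_single_mismatch_index (id1 : String) (id2 : String) : Prop :=
  id1.toList.length ≤ id2.toList.length
instance (id1 : String) (id2 : String) : Decidable (Pre_get_single_mismatch_index id1 id2) := by
  unfold Pre_get_single_mismatch_index; infer_instance
def pvWitness_get_single_mismatch_index : String × String := ("abc", "axc")

def Spec_get_single_mismatch_index (id1 : String) (id2 : String) (out : Int) : Prop :=
  out = get_single_mismatch_index_alt id1 id2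
instance (id1 : String) (id2 : String) (out : Int) : Decidable (Spec_get_single_mismatch_index id1 id2 out) := by
  unfold Spec_get_single_mismatch_index; infer_instance

-- ===== CLAIM (what is proved, stated in full; the proofs are below) =====
def Claim_equal_get_single_mismatch_index : Prop := ∀ (id1 : String) (id2 : String), Dom_get_single_mismatch_index id1 id2 → Pre_get_single_mismatch_index id1 id2 → Spec_get_single_mismatch_index id1 id2 (get_single_mismatch_index id1 id2)

-- ===== LEMMAS AND PROOFS =====

-- proof-side normal form: the (strictly increasing) list of mismatching positions
def diffIdx : List Char → List Char → List Nat
  | a :: as, b :: bs =>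
    if a = b then (diffIdx as bs).map (· + 1) else 0 :: (diffIdx as bs).map (· + 1)
  | _, _ => []

theorem diffIdx_lt (l1 l2 : List Char) : ∀ k ∈ diffIdx l1 l2, k < l1.length := by
  induction l1 generalizing l2 with
  | nil => intro k hk; simp [diffIdx] at hk
  | cons a as ih =>
    intro k hk
    cases l2 with
    | nil => simp [diffIdx] at hk
    | cons b bs =>
      simp only [diffIdx] at hk
      split_ifs at hk with h
      · rcases List.mem_map.mp hk with ⟨j, hj, rfl⟩
        have := ih bs j hj; simp; omega
      · rcases List.mem_cons.mp hk with rfl | hk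
        · simp
        · rcases List.mem_map.mp hk with ⟨j, hj, rfl⟩
          have := ih bs j hj; simp; omega

theorem diffIdx_pairwise (l1 l2 : List Char) : (diffIdx l1 l2).Pairwise (· < ·) := by
  induction l1 generalizing l2 with
  | nil => simp [diffIdx]
  | cons a as ih =>
    cases l2 with
    | nil => simp [diffIdx]
    | cons b bs =>
      have hmap : ((diffIdx as bs).map (· + 1)).Pairwise (· < ·) := by
        exact List.pairwise_map.mpr (by simpa using ih bs)
      simp only [diffIdx]
      split_ifs with h
      · exact hmap
      · exact List.pairwise_cons.mpr ⟨by intro x hx; rcases List.mem_map.mp hx with ⟨j, _, rfl⟩; omega, hmap⟩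

theorem diffIdx_take (l1 l2 : List Char) (h : l1.length ≤ l2.length) :
    diffIdx l1 (l2.take l1.length) = diffIdx l1 l2 := by
  induction l1 generalizing l2 with
  | nil => cases l2 <;> simp [diffIdx]
  | cons a as ih =>
    cases l2 with
    | nil => simp at h
    | cons b bs =>
      simp only [List.length_cons, List.take_succ_cons, diffIdx]
      rw [ih bs (by simpa using h)]

-- A's filtered index list is exactly diffIdx
theorem range_filter_eq_diffIdx (l1 l2 : List Char) (h : l1.length ≤ l2.length) :
    (List.range l1.length).filter (fun j => l1[j]? ≠ l2[j]?) = diffIdx l1 l2 := by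
  induction l1 generalizing l2 with
  | nil => simp [diffIdx]
  | cons a as ih =>
    cases l2 with
    | nil => simp at h
    | cons b bs =>
      rw [List.length_cons, List.range_succ_eq_map, List.filter_cons, List.filter_map]
      by_cases hab : a = b <;>
        · simp [diffIdx, hab, Function.comp_def, ← ih bs (by simpa using h)]
          rfl

-- A's loop after the first mismatch (count = 1): -1 iff any further mismatch
theorem pvALoop_one (l1 l2 : List Char) (js : List Int) (i : Int) :
    pvALoop l1 l2 js 1 i =
      if js.any (fun j => PySem.List.pyGet? l1 j ≠ PySem.List.pyGet? l2 j) then -1 else i := by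
  induction js with
  | nil => simp [pvALoop]
  | cons j rest ih =>
    by_cases h : PySem.List.pyGet? l1 j ≠ PySem.List.pyGet? l2 j <;>
      simp [pvALoop, h, ih]

-- A's loop from the initial state, as a match on the filtered mismatch list
theorem pvALoop_zero (l1 l2 : List Char) (js : List Int) :
    pvALoop l1 l2 js 0 (-1) =
      match js.filter (fun j => PySem.List.pyGet? l1 j ≠ PySem.List.pyGet? l2 j) with
      | [j] => j
      | _ => -1 := by
  induction js with
  | nil => simp [pvALoop]
  | cons j rest ih =>
    by_cases h : PySem.List.pyGet? l1 j ≠ PySem.List.pyGet? l2 j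
    · have h1 : pvALoop l1 l2 (j :: rest) 0 (-1) = pvALoop l1 l2 rest 1 j := by
        simp [pvALoop, h]
      have hd : (decide (PySem.List.pyGet? l1 j ≠ PySem.List.pyGet? l2 j)) = true := by
        simpa using h
      rw [h1, pvALoop_one, List.filter_cons, hd, if_pos rfl]
      rcases hf : rest.filter (fun j => PySem.List.pyGet? l1 j ≠ PySem.List.pyGet? l2 j) with _ | ⟨x, xs⟩
      · have ha : (rest.any fun j => decide (PySem.List.pyGet? l1 j ≠ PySem.List.pyGet? l2 j)) = false := by
          rw [List.any_eq_false]
          intro x hx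
          have := List.filter_eq_nil_iff.mp hf x hx
          simpa using this
        rw [ha]; simp
      · have ha : (rest.any fun j => decide (PySem.List.pyGet? l1 j ≠ PySem.List.pyGet? l2 j)) = true := by
          rw [List.any_eq_true]
          have hm : x ∈ rest.filter (fun j => PySem.List.pyGet? l1 j ≠ PySem.List.pyGet? l2 j) := by
            rw [hf]; exact List.mem_cons_self
          rcases List.mem_filter.mp hm with ⟨hmem, hp⟩
          exact ⟨x, hmem, hp⟩
        rw [ha]; simp
    · simp [pvALoop, h, ih]

-- A's value in diffIdx normal form
theorem portA_eq_diffIdx (l1 l2 : List Char) (h : l1.length ≤ l2.length) :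
    pvALoop l1 l2 (PySem.List.pyRange 0 (l1.length : Int) 1) 0 (-1) =
      match diffIdx l1 l2 with
      | [k] => (k : Int)
      | _ => -1 := by
  have key : (List.filter (fun j => decide (PySem.List.pyGet? l1 j ≠ PySem.List.pyGet? l2 j))
      ((List.range l1.length).map (fun k : Nat => (k : Int)))) =
      (diffIdx l1 l2).map (fun k : Nat => (k : Int)) := by
    rw [List.filter_map, ← range_filter_eq_diffIdx l1 l2 h]
    congr 1
    apply List.filter_congr
    intro j _
    simp [pysem]
  rw [pvALoop_zero, PySem.List.pyRange_zero_natCast, key]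
  rcases hd : diffIdx l1 l2 with _ | ⟨k, _ | ⟨k2, rest⟩⟩ <;> simp

-- B's prefix length is the first mismatch position (or n when none), for equal lengths
theorem pvPrefLen_eq_headD (l1 t : List Char) (h : l1.length = t.length) :
    pvPrefLen l1 t = (diffIdx l1 t).headD l1.length := by
  induction l1 generalizing t with
  | nil => cases t <;> simp_all [pvPrefLen, diffIdx]
  | cons a as ih =>
    cases t with
    | nil => simp at h
    | cons b bs =>
      by_cases hab : a = b
      · simp only [pvPrefLen, diffIdx, hab, if_neg (by simp : ¬ (b ≠ b))]
        rw [ih bs (by simpa using h)]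
        rcases diffIdx as bs with _ | ⟨k, ks⟩ <;> simp
      · simp [pvPrefLen, diffIdx, hab]

-- last-position mismatch under appending one character at the end
theorem diffIdx_append (xs ys : List Char) (a b : Char) (h : xs.length = ys.length) :
    diffIdx (xs ++ [a]) (ys ++ [b]) =
      diffIdx xs ys ++ (if a = b then [] else [xs.length]) := by
  induction xs generalizing ys with
  | nil =>
    cases ys with
    | nil => by_cases hab : a = b <;> simp [diffIdx, hab]
    | cons y ys => simp at h
  | cons x xs ih =>
    cases ys with
    | nil => simp at h
    | cons y ys =>
      simp only [List.cons_append, diffIdx]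
      rw [ih ys (by simpa using h)]
      by_cases hxy : x = y <;> by_cases hab : a = b <;> simp [hxy, hab]

-- the mismatch positions of the reversals are the reflected positions, reversed
theorem diffIdx_reverse (l1 t : List Char) (h : l1.length = t.length) :
    diffIdx l1.reverse t.reverse =
      ((diffIdx l1 t).map (fun k => l1.length - 1 - k)).reverse := by
  induction l1 generalizing t with
  | nil => cases t <;> simp_all [diffIdx]
  | cons a as ih =>
    cases t with
    | nil => simp at h
    | cons b bs =>
      have hlen : as.length = bs.length := by simpa using h
      simp only [List.reverse_cons]
      rw [diffIdx_append as.reverse bs.reverse a b (by simp [hlen]), ih bs hlen]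
      by_cases hab : a = b <;>
        · simp [diffIdx, hab, List.map_map]
          intro k _
          omega

-- ===== VERDICT (by name: the statement is the Claim_ definition above) =====
theorem get_single_mismatch_index_spec : Claim_equal_get_single_mismatch_index := by
  intro id1 id2 _ hpre
  unfold Pre_get_single_mismatch_index at hpre
  unfold Spec_get_single_mismatch_index get_single_mismatch_index
  simp only [get_single_mismatch_index_alt, PySem.List.slice_to_natCast]
  generalize hg1 : id1.toList = l1 at *
  generalize hg2 : id2.toList = l2 at *
  set t := l2.take l1.length with htdef
  have hlen : l1.length = t.length := by
    simp [htdef]; omega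
  have hdt : diffIdx l1 t = diffIdx l1 l2 := diffIdx_take l1 l2 hpre
  rw [portA_eq_diffIdx l1 l2 hpre, ← hdt]
  rw [pvPrefLen_eq_headD l1 t hlen]
  rcases hd : diffIdx l1 t with _ | ⟨k1, tl⟩
  · simp
  · have hk1 : k1 < l1.length := diffIdx_lt l1 t k1 (by rw [hd]; exact List.mem_cons_self)
    have hs : pvPrefLen l1.reverse t.reverse =
        ((diffIdx l1 t).map (fun k => l1.length - 1 - k)).reverse.headD l1.length := by
      rw [pvPrefLen_eq_headD l1.reverse t.reverse (by simp [hlen]),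
          diffIdx_reverse l1 t hlen]
      simp
    rcases tl with _ | ⟨k2, rest⟩
    · -- exactly one mismatch: prefix = k1, suffix = n - 1 - k1
      rw [hs]
      simp only [hd, List.map_cons, List.map_nil, List.reverse_cons, List.reverse_nil,
        List.nil_append, List.headD_cons]
      have hsum : (k1 : Int) + ((l1.length - 1 - k1 : Nat) : Int) = (l1.length : Int) - 1 := by
        push_cast [Nat.sub_sub]
        omega
      simp [if_neg (by omega : ¬ k1 = l1.length), hsum]
    · -- at least two mismatches: prefix + suffix < n - 1
      rw [hs]
      have hpair := diffIdx_pairwise l1 t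
      rw [hd] at hpair
      have hlast_mem : (k2 :: rest).getLast (by simp) ∈ k2 :: rest := List.getLast_mem _
      have hk1lt : k1 < (k2 :: rest).getLast (by simp) :=
        (List.pairwise_cons.mp hpair).1 _ hlast_mem
      have hlastlt : (k2 :: rest).getLast (by simp) < l1.length :=
        diffIdx_lt l1 t _ (by rw [hd]; exact List.mem_cons_of_mem _ hlast_mem)
      set kl := (k2 :: rest).getLast (by simp) with hkl
      have hmapne : ((diffIdx l1 t).map (fun k => l1.length - 1 - k)) ≠ [] := by simp [hd]
      have hrevhead : ((diffIdx l1 t).map (fun k => l1.length - 1 - k)).reverse.headD l1.length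
          = l1.length - 1 - kl := by
        rw [List.headD_eq_head?_getD, List.head?_reverse, List.getLast?_eq_some_getLast hmapne]
        simp only [Option.getD_some]
        rw [List.getLast_map hmapne]
        have : (diffIdx l1 t).getLast (by simpa using hmapne) = kl := by
          simp only [hd, hkl]
          rw [List.getLast_cons (by simp)]
        rw [this]
      rw [hrevhead]
      have hne : ¬ ((k1 : Int) + ((l1.length - 1 - kl : Nat) : Int) = (l1.length : Int) - 1) := by
        push_cast [Nat.sub_sub]
        omega
      simp [hne]
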